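-- pv_equiv track=rewrite | github.com/alainlou/LeetCode | p1489.py | findCriticalAndPseudoCriticalEdges
-- ===== SOURCE A (Python) =====
-- from typing import List
--
-- class DSU:
--     def __init__(self, n):
--         self.parent = list(range(n))
--
--     def find(self, target):
--         if self.parent[target] != target:
--             self.parent[target] = self.find(self.parent[target])
--         return self.parent[target]
--
--     def union(self, c, p):
--         self.parent[self.find(c)] = p
--
-- def findCriticalAndPseudoCriticalEdges(n: int, edges: List[List[int]]) -> List[List[int]]:
--     edges = [[a, b, c, d] for d, (a, b, c) in enumerate(edges)]
--     edges.sort(key=lambda x: x[2])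
--
--     crit = set()
--     pseudo_crit = set()
--
--     def mst(n, edges, start):
--         if len(edges) == 0:
--             return float('inf')
--         dsu = DSU(n)
--         dsu.union(edges[start][0], edges[start][1])
--         cost = edges[start][2]
--         for i, e in enumerate(edges):
--             if dsu.find(e[0]) != dsu.find(e[1]):
--                 dsu.union(e[0], e[1])
--                 cost += e[2]
--         for i in range(n):
--             if dsu.find(i) != dsu.find(0):
--                 return float('inf')
--         return cost
--
--     cost = mst(n, edges, 0)
--
--     for i, e in enumerate(edges):
--         tmp = edges.pop(i)
--         if mst(n, edges, 0) > cost: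
--             crit.add(e[3])
--         edges.insert(i, tmp)
--         if mst(n, edges, i) == cost:
--             pseudo_crit.add(e[3])
--
--     return [list(crit), list(pseudo_crit-crit)]
-- ===== SOURCE B (Python) =====
-- # Kruskal with a label-relabel partition (dict of component labels) instead of A's
-- # path-compressing DSU, and a pure driver (list slicing) instead of A's pop/insert mutation.
-- INF = float('inf')
--
-- def findCriticalAndPseudoCriticalEdges(n, edges):
--     order = sorted(enumerate(edges), key=lambda p: p[1][2])
--
--     def kruskal(lst, forced):
--         # spanning cost of lst's edges with `forced` taken first (A's mst convention:
--         # the forced/seed edge is always counted); INF when not all n vertices connect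
--         comp = {v: v for v in range(n)}
--         total = 0
--
--         def merge(u, v):
--             cu, cv = comp[u], comp[v]
--             if cu == cv:
--                 return False
--             for k in comp:
--                 if comp[k] == cv:
--                     comp[k] = cu
--             return True
--
--         fu, fv, fw = forced[1]
--         merge(fu, fv)
--         total += fw
--         for _idx, (u, v, w) in lst:
--             if merge(u, v):
--                 total += w
--         root = comp[0]
--         if any(c != root for c in comp.values()):
--             return INF
--         return total
--
--     base = kruskal(order, order[0]) if order else INF
--
--     crit, pseudo = set(), set()
--     for p, (idx, _e) in enumerate(order):
--         rest = order[:p] + order[p+1:]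
--         ex = kruskal(rest, rest[0]) if rest else INF
--         if ex > base:
--             crit.add(idx)
--         if kruskal(order, order[p]) == base:
--             pseudo.add(idx)
--
--     return [list(crit), list(pseudo - crit)]
-- ===== Notes on version B (the rewrite author's own statement) =====
-- stated objective: alternative
-- what changed: Replaces A's path-compressing recursive DSU with a dict-of-component-labels partition merged by relabelling, and A's in-place pop/insert mutation of the shared edge list with a pure driver over list slices and a single seeded-Kruskal helper.
-- outside the precondition, e.g. on findCriticalAndPseudoCriticalEdges(2, [[0, -1, 1]]): A returns [[0], []], B raises KeyError
import Mathlib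
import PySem

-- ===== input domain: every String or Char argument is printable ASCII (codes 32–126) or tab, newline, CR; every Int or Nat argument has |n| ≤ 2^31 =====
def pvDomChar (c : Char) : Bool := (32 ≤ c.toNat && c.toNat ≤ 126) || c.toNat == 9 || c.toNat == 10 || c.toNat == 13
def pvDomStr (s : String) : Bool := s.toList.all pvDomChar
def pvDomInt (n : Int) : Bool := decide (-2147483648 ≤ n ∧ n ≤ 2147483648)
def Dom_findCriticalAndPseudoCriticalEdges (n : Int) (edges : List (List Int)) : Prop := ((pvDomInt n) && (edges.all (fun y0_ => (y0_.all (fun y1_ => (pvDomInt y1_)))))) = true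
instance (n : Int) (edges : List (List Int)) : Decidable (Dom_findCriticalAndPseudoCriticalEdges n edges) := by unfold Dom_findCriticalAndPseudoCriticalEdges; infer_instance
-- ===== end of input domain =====

-- B replaces A's path-compressing DSU and in-place pop/insert mutation of the shared edge
-- list by a dict-of-component-labels partition (merged by relabelling) and a pure driver
-- over list slices; objective: alternative structure, not speed.

-- ===== PORT A =====

-- Python's int/float('inf') comparisons, with `none` = float('inf') (used by both ports;
-- exact: mst costs are either an int or positive infinity).
def pyGtI (a b : Option Int) : Bool :=
  match a, b with
  | none, none => false
  | none, some _ => true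
  | some _, none => false
  | some x, some y => decide (y < x)

def pyEqI (a b : Option Int) : Bool :=
  match a, b with
  | none, none => true
  | some x, some y => x == y
  | _, _ => false

-- ----- hand-written exact model of CPython's set hash table (Objects/setobject.c), for
-- nonnegative int keys (hash(k) = k, as CPython computes for small ints): add with
-- linear probes + perturbed LCG, growth at fill*5 >= mask*3, clean reinsertion, and
-- iteration in slot order; used by both ports for list(set)/set-difference order.
-- The fuel arguments only bound the probe loops, which always find a slot earlier
-- (the table is never full); all numeric choices copied from CPython 3.11.

def cpyLin (table : List (Option Int)) (k : Int) : Nat → Nat → Option (Option Nat)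
  | _, 0 => none
  | j, c+1 =>
    match table.getD j none with
    | none => some (some j)
    | some e => if e = k then some none else cpyLin table k (j+1) c

def cpyProbe (table : List (Option Int)) (mask : Nat) (k : Int) : Nat → Nat → Nat → Option Nat
  | 0, i, _ => some i  -- fuel guard, unreachable
  | fuel+1, i, perturb =>
    match table.getD i none with
    | none => some i
    | some e =>
      if e = k then none
      else
        match (if i + 9 ≤ mask then cpyLin table k (i+1) 9 else none) with
        | some r => r
        | none => cpyProbe table mask k fuel ((i*5+1+(perturb >>> 5)) &&& mask) (perturb >>> 5)

def cpyLinClean (table : List (Option Int)) : Nat → Nat → Option Nat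
  | _, 0 => none
  | j, c+1 =>
    match table.getD j none with
    | none => some j
    | some _ => cpyLinClean table (j+1) c

def cpyCleanProbe (table : List (Option Int)) (mask : Nat) : Nat → Nat → Nat → Nat
  | 0, i, _ => i  -- fuel guard, unreachable
  | fuel+1, i, perturb =>
    match table.getD i none with
    | none => i
    | some _ =>
      match (if i + 9 ≤ mask then cpyLinClean table (i+1) 9 else none) with
      | some j => j
      | none => cpyCleanProbe table mask fuel ((i*5+1+(perturb >>> 5)) &&& mask) (perturb >>> 5)

def cpyInsertClean (table : List (Option Int)) (tsz : Nat) (k : Int) : List (Option Int) :=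
  table.set (cpyCleanProbe table (tsz-1) (2*tsz+64) (k.toNat &&& (tsz-1)) k.toNat) (some k)

def cpyGrow (minused : Nat) : Nat → Nat → Nat
  | 0, ns => ns
  | f+1, ns => if ns ≤ minused then cpyGrow minused f (2*ns) else ns

def cpyNewsize (minused : Nat) : Nat := cpyGrow minused 64 8

def cpyResize (used : Nat) (table : List (Option Int)) (minused : Nat) :
    Nat × Nat × List (Option Int) :=
  let tsz := cpyNewsize minused
  (tsz, used,
    table.foldl (fun t o => match o with | none => t | some k => cpyInsertClean t tsz k)
      (List.replicate tsz none))

def cpyAdd (st : Nat × Nat × List (Option Int)) (k : Int) : Nat × Nat × List (Option Int) :=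
  match cpyProbe st.2.2 (st.1-1) k (2*st.1+64) (k.toNat &&& (st.1-1)) k.toNat with
  | none => st
  | some slot =>
    let table := st.2.2.set slot (some k)
    let used := st.2.1 + 1
    if used*5 ≥ (st.1-1)*3 then
      cpyResize used table (if used > 50000 then used*2 else used*4)
    else (st.1, used, table)

def cpySet (seq : List Int) : Nat × Nat × List (Option Int) :=
  seq.foldl cpyAdd (8, 0, List.replicate 8 none)

def cpyOrder (table : List (Option Int)) : List Int := table.filterMap id

def cpySetList (seq : List Int) : List Int := cpyOrder (cpySet seq).2.2

def cpyDiffList (seqP seqC : List Int) : List Int :=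
  let sp := cpySet seqP
  let soOrder := cpyOrder sp.2.2
  if soOrder.length >>> 2 > seqC.length then
    let tsz := if soOrder.length*5 ≥ 21 then cpyNewsize (soOrder.length*2) else 8
    if tsz = sp.1 then soOrder.filter (fun x => !(seqC.contains x))
    else
      (cpyOrder (soOrder.foldl (fun t k => cpyInsertClean t tsz k)
        (List.replicate tsz none))).filter (fun x => !(seqC.contains x))
  else cpySetList (soOrder.filter (fun x => !(seqC.contains x)))

-- DSU.find with path compression; `fuel` only makes the Python recursion structural
-- (under Pre_ the parent forest is acyclic and fuel n+1 is never exhausted).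
def dsuFind : Nat → List Int → Int → Int × List Int
  | 0, parent, t => (t, parent)
  | fuel+1, parent, t =>
    let pt := PySem.List.pyGetD parent t 0
    if pt ≠ t then
      let f := dsuFind fuel parent pt
      (f.1, PySem.List.pySetD f.2 t f.1)
    else (t, parent)

-- DSU.union: parent[find(c)] = p
def dsuUnion (F : Nat) (parent : List Int) (c p : Int) : List Int :=
  let f := dsuFind F parent c
  PySem.List.pySetD f.2 f.1 p

-- the `for i in range(n): if dsu.find(i) != dsu.find(0): return inf` tail of mst
def connA (F : Nat) : List Int → Int → List Int → Option Int
  | _, cost, [] => some cost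
  | parent, cost, i :: rest =>
    let f1 := dsuFind F parent i
    let f2 := dsuFind F f1.2 0
    if f1.1 ≠ f2.1 then none else connA F f2.2 cost rest

def mstA (n : Int) (sedges : List (List Int)) (start : Int) : Option Int :=
  if sedges.length = 0 then none
  else
    let F := n.toNat + 1
    let se := PySem.List.pyGetD sedges start []
    let parent1 := dsuUnion F (PySem.List.pyRange 0 n 1)
        (PySem.List.pyGetD se 0 0) (PySem.List.pyGetD se 1 0)
    let st := sedges.foldl (fun (st : List Int × Int) e =>
        let f1 := dsuFind F st.1 (PySem.List.pyGetD e 0 0)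
        let f2 := dsuFind F f1.2 (PySem.List.pyGetD e 1 0)
        if f1.1 ≠ f2.1 then
          (dsuUnion F f2.2 (PySem.List.pyGetD e 0 0) (PySem.List.pyGetD e 1 0),
           st.2 + PySem.List.pyGetD e 2 0)
        else (f2.2, st.2))
      (parent1, PySem.List.pyGetD se 2 0)
    connA F st.1 st.2 (PySem.List.pyRange 0 n 1)

def findCriticalAndPseudoCriticalEdges (n : Int) (edges : List (List Int)) : List (List Int) :=
  let quads := (PySem.List.enumerate edges).map (fun de =>
      [PySem.List.pyGetD de.2 0 0, PySem.List.pyGetD de.2 1 0, PySem.List.pyGetD de.2 2 0, de.1])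
  let sed := PySem.List.sorted quads (fun x => PySem.List.pyGetD x 2 0) false
  let cost := mstA n sed 0
  let st := (PySem.List.enumerate sed).foldl
    (fun (st : List (List Int) × PySem.Set Int × PySem.Set Int) ie =>
      match PySem.List.pop? st.1 ie.1 with
      | none => st  -- unreachable: the enumerate index is always in range
      | some (tmp, rest) =>
        let crit := if pyGtI (mstA n rest 0) cost
                    then PySem.Set.add st.2.1 (PySem.List.pyGetD ie.2 3 0) else st.2.1
        let s2 := PySem.List.insert rest ie.1 tmp
        let pseudo := if pyEqI (mstA n s2 ie.1) cost
                      then PySem.Set.add st.2.2 (PySem.List.pyGetD ie.2 3 0) else st.2.2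
        (s2, crit, pseudo))
    (sed, PySem.Set.empty, PySem.Set.empty)
  [cpySetList st.2.1, cpyDiffList st.2.2 st.2.1]

-- ===== PORT B =====

def mergeB (comp : PySem.Dict Int Int) (u v : Int) : PySem.Dict Int Int × Bool :=
  let cu := PySem.Dict.getD comp u 0
  let cv := PySem.Dict.getD comp v 0
  if cu = cv then (comp, false)
  else (PySem.Dict.mk (comp.items.map (fun kc => if kc.2 = cv then (kc.1, cu) else kc)), true)

def kruskalB (n : Int) (lst : List (Int × List Int)) (forced : Int × List Int) : Option Int :=
  let comp0 := (PySem.List.pyRange 0 n 1).foldl (fun d v => PySem.Dict.insert d v v) PySem.Dict.empty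
  let m1 := mergeB comp0 (PySem.List.pyGetD forced.2 0 0) (PySem.List.pyGetD forced.2 1 0)
  let st := lst.foldl (fun (st : PySem.Dict Int Int × Int) p =>
      let m := mergeB st.1 (PySem.List.pyGetD p.2 0 0) (PySem.List.pyGetD p.2 1 0)
      if m.2 then (m.1, st.2 + PySem.List.pyGetD p.2 2 0) else (m.1, st.2))
    (m1.1, PySem.List.pyGetD forced.2 2 0)
  let root := PySem.Dict.getD st.1 0 0
  if (PySem.Dict.values st.1).any (fun c => c ≠ root) then none else some st.2

def findCriticalAndPseudoCriticalEdges_alt (n : Int) (edges : List (List Int)) : List (List Int) :=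
  let order := PySem.List.sorted (PySem.List.enumerate edges) (fun p => PySem.List.pyGetD p.2 2 0) false
  let base := match order with
    | [] => none
    | o :: _ => kruskalB n order o
  let st := (PySem.List.enumerate order).foldl
    (fun (st : List Int × List Int) pp =>
      let rest := PySem.List.slice order none (some pp.1) ++ PySem.List.slice order (some (pp.1 + 1)) none
      let ex := match rest with
        | [] => none
        | r :: _ => kruskalB n rest r
      let crit := if pyGtI ex base then PySem.Set.add st.1 pp.2.1 else st.1
      let pseudo := if pyEqI (kruskalB n order pp.2) base then PySem.Set.add st.2 pp.2.1 else st.2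
      (crit, pseudo))
    (PySem.Set.empty, PySem.Set.empty)
  [cpySetList st.1, cpyDiffList st.2 st.1]

-- ===== PRECONDITION & SPEC =====
-- Pre_ excludes exactly the inputs where a program raises: A raises IndexError/ValueError
-- unless every edge is a 3-list with endpoints in [-n, n); additionally, endpoints in
-- [-n, 0) (where A silently wraps around via Python negative indexing) are excluded
-- because B's dict lookup raises KeyError there.
def Pre_findCriticalAndPseudoCriticalEdges (n : Int) (edges : List (List Int)) : Prop :=
  edges = [] ∨ (1 ≤ n ∧ ∀ e ∈ edges, e.length = 3 ∧
    0 ≤ e.getD 0 0 ∧ e.getD 0 0 < n ∧ 0 ≤ e.getD 1 0 ∧ e.getD 1 0 < n)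
instance (n : Int) (edges : List (List Int)) : Decidable (Pre_findCriticalAndPseudoCriticalEdges n edges) := by
  unfold Pre_findCriticalAndPseudoCriticalEdges; infer_instance

def pvWitness_findCriticalAndPseudoCriticalEdges : Int × List (List Int) :=
  (4, [[0, 1, 1], [1, 2, 1], [2, 3, 2], [0, 3, 2], [0, 2, 2]])

def Spec_findCriticalAndPseudoCriticalEdges (n : Int) (edges : List (List Int)) (out : List (List Int)) : Prop := out = findCriticalAndPseudoCriticalEdges_alt n edges
instance (n : Int) (edges : List (List Int)) (out : List (List Int)) : Decidable (Spec_findCriticalAndPseudoCriticalEdges n edges out) := by unfold Spec_findCriticalAndPseudoCriticalEdges; infer_instance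

-- ===== CLAIM (what is proved, stated in full; the proofs are below) =====
def Claim_equal_findCriticalAndPseudoCriticalEdges : Prop := ∀ (n : Int) (edges : List (List Int)), Dom_findCriticalAndPseudoCriticalEdges n edges → Pre_findCriticalAndPseudoCriticalEdges n edges → Spec_findCriticalAndPseudoCriticalEdges n edges (findCriticalAndPseudoCriticalEdges n edges)

-- ===== LEMMAS AND PROOFS =====

-- root machinery
def pstep (par : List Int) (u : Int) : Int := PySem.List.pyGetD par u 0

def rootF : Nat → List Int → Int → Int
  | 0, _, u => u
  | k+1, par, u => if pstep par u = u then u else rootF k par (pstep par u)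

def Rng (n : Int) (u : Int) : Prop := 0 ≤ u ∧ u < n

def WFh (n : Int) (par : List Int) (h : Int → Nat) : Prop :=
  par.length = n.toNat ∧ (∀ u, Rng n u → Rng n (pstep par u)) ∧
    (∀ u, Rng n u → pstep par u ≠ u → h (pstep par u) < h u)

theorem rootF_of_fix {par : List Int} {u : Int} (hf : pstep par u = u) (k : Nat) :
    rootF k par u = u := by
  induction k with
  | zero => rfl
  | succ k ih => simp [rootF, hf]

theorem rootF_succ_of_ne {par : List Int} {u : Int} (h : pstep par u ≠ u) (k : Nat) :
    rootF (k+1) par u = rootF k par (pstep par u) := by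
  simp [rootF, h]



-- chain iterate
def chain (par : List Int) (u : Int) : Nat → Int
  | 0 => u
  | j+1 => pstep par (chain par u j)

theorem chain_rng {n : Int} {par : List Int} {h : Int → Nat} (hwf : WFh n par h) {u : Int}
    (hu : Rng n u) (j : Nat) : Rng n (chain par u j) := by
  induction j with
  | zero => exact hu
  | succ j ih => exact hwf.2.1 _ ih

-- there is a fixpoint on the chain within n.toNat steps
theorem exists_fix_on_chain {n : Int} {par : List Int} {h : Int → Nat} (hwf : WFh n par h)
    {u : Int} (hu : Rng n u) : ∃ j ≤ n.toNat, pstep par (chain par u j) = chain par u j := by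
  by_contra hcon
  push Not at hcon
  -- all of chain 0 .. n.toNat are non-fix; h strictly decreasing gives injectivity
  have hnf : ∀ i ≤ n.toNat, pstep par (chain par u i) ≠ chain par u i := fun i hi => hcon i hi
  have hmono : ∀ i j : Nat, i < j → j ≤ n.toNat + 1 → h (chain par u j) < h (chain par u i) := by
    intro i j hij hj
    induction j with
    | zero => omega
    | succ j ih =>
      have hstep : h (chain par u (j+1)) < h (chain par u j) :=
        hwf.2.2 _ (chain_rng hwf hu j) (hnf j (by omega))
      rcases Nat.lt_or_ge i j with hij' | hij'
      · exact lt_trans hstep (ih hij' (by omega))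
      · have : i = j := by omega
        subst this; exact hstep
  -- chain 0..n.toNat : n.toNat+1 distinct values in [0, n)
  have hinj : ∀ i j : Nat, i ≤ n.toNat → j ≤ n.toNat → i ≠ j → chain par u i ≠ chain par u j := by
    intro i j hi hj hne heq
    rcases Nat.lt_or_ge i j with hlt | hge
    · have := hmono i j hlt (by omega); rw [heq] at this; omega
    · have hlt : j < i := by omega
      have := hmono j i hlt (by omega); rw [heq] at this; omega
  -- pigeonhole
  have hmaps : ∀ i ∈ Finset.range (n.toNat + 1), (chain par u i).toNat ∈ Finset.range n.toNat := by
    intro i _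
    have := chain_rng hwf hu i
    simp only [Finset.mem_range]
    rcases this with ⟨h1, h2⟩
    omega
  have hcard : (Finset.range n.toNat).card < (Finset.range (n.toNat + 1)).card := by
    simp
  obtain ⟨i, hi, j, hj, hne, heq⟩ :=
    Finset.exists_ne_map_eq_of_card_lt_of_maps_to hcard hmaps
  simp only [Finset.mem_range] at hi hj
  apply hinj i j (by omega) (by omega) hne
  obtain ⟨h1, h2⟩ := chain_rng hwf hu i
  obtain ⟨h3, h4⟩ := chain_rng hwf hu j
  omega

theorem chain_shift {par : List Int} {u : Int} (j : Nat) :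
    chain par u (j+1) = chain par (pstep par u) j := by
  induction j with
  | zero => rfl
  | succ j ih => show pstep par (chain par u (j+1)) = _; rw [ih]; rfl

theorem rootF_eq_of_chain_fix {par : List Int} :
    ∀ (k : Nat) (u : Int) (j : Nat), j ≤ k → pstep par (chain par u j) = chain par u j →
      pstep par (rootF k par u) = rootF k par u := by
  intro k
  induction k with
  | zero =>
    intro u j hj hf
    interval_cases j
    exact hf
  | succ k ih =>
    intro u j hj hf
    by_cases hfu : pstep par u = u
    · rw [rootF_of_fix hfu]; exact hfu
    · rw [rootF_succ_of_ne hfu]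
      match j, hf with
      | 0, hf => exact absurd hf hfu
      | j+1, hf =>
        rw [chain_shift] at hf
        exact ih (pstep par u) j (by omega) hf

theorem rootF_stable {par : List Int} :
    ∀ (k : Nat) (u : Int), pstep par (rootF k par u) = rootF k par u →
    ∀ m, k ≤ m → rootF m par u = rootF k par u := by
  intro k
  induction k with
  | zero =>
    intro u hf m _
    exact rootF_of_fix hf m
  | succ k ih =>
    intro u hf m hm
    by_cases hfu : pstep par u = u
    · rw [rootF_of_fix hfu (k+1), rootF_of_fix hfu m]
    · match m, hm with
      | m+1, hm =>
        rw [rootF_succ_of_ne hfu] at hf ⊢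
        rw [rootF_succ_of_ne hfu k]
        exact ih (pstep par u) hf m (by omega)
def RootN (n : Int) (par : List Int) (u : Int) : Int := rootF (n.toNat + 1) par u

theorem rootF_is_chain {par : List Int} :
    ∀ (k : Nat) (u : Int), ∃ j ≤ k, rootF k par u = chain par u j := by
  intro k
  induction k with
  | zero => intro u; exact ⟨0, le_refl _, rfl⟩
  | succ k ih =>
    intro u
    by_cases hf : pstep par u = u
    · exact ⟨0, by omega, rootF_of_fix hf _⟩
    · obtain ⟨j, hj, he⟩ := ih (pstep par u)
      exact ⟨j+1, by omega, by rw [rootF_succ_of_ne hf, he, chain_shift]⟩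

theorem root_fix {n : Int} {par : List Int} {h : Int → Nat} (hwf : WFh n par h) {u : Int}
    (hu : Rng n u) : pstep par (RootN n par u) = RootN n par u := by
  obtain ⟨j, hj, hf⟩ := exists_fix_on_chain hwf hu
  exact rootF_eq_of_chain_fix (n.toNat + 1) u j (by omega) hf

theorem root_rng {n : Int} {par : List Int} {h : Int → Nat} (hwf : WFh n par h) {u : Int}
    (hu : Rng n u) : Rng n (RootN n par u) := by
  obtain ⟨j, _, he⟩ := rootF_is_chain (par := par) (n.toNat + 1) u
  rw [RootN, he]; exact chain_rng hwf hu j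

theorem root_of_fix {n : Int} {par : List Int} {u : Int} (hf : pstep par u = u) :
    RootN n par u = u := rootF_of_fix hf _

theorem root_eq_of_fuel {n : Int} {par : List Int} {h : Int → Nat} (hwf : WFh n par h) {u : Int}
    (hu : Rng n u) {k : Nat} (hf : pstep par (rootF k par u) = rootF k par u) :
    rootF k par u = RootN n par u := by
  rcases Nat.le_total k (n.toNat + 1) with hk | hk
  · exact (rootF_stable k u hf (n.toNat + 1) hk).symm
  · exact rootF_stable (n.toNat + 1) u (root_fix hwf hu) k hk

theorem root_step {n : Int} {par : List Int} {h : Int → Nat} (hwf : WFh n par h) {u : Int}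
    (hu : Rng n u) : RootN n par u = RootN n par (pstep par u) := by
  by_cases hf : pstep par u = u
  · rw [hf]
  · have h1 : rootF (n.toNat + 1) par u = rootF n.toNat par (pstep par u) :=
      rootF_succ_of_ne hf _
    have hfix : pstep par (rootF n.toNat par (pstep par u)) = rootF n.toNat par (pstep par u) := by
      rw [← h1]; exact root_fix hwf hu
    rw [RootN, h1]
    exact root_eq_of_fuel hwf (hwf.2.1 u hu) hfix

theorem h_chain_le {n : Int} {par : List Int} {h : Int → Nat} (hwf : WFh n par h) {u : Int}
    (hu : Rng n u) : ∀ j, h (chain par u j) ≤ h u := by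
  intro j
  induction j with
  | zero => exact le_refl _
  | succ j ih =>
    by_cases hf : pstep par (chain par u j) = chain par u j
    · show h (pstep par (chain par u j)) ≤ h u
      rw [hf]; exact ih
    · exact le_trans (le_of_lt (hwf.2.2 _ (chain_rng hwf hu j) hf)) ih

theorem h_root_le {n : Int} {par : List Int} {h : Int → Nat} (hwf : WFh n par h) {u : Int}
    (hu : Rng n u) : h (RootN n par u) ≤ h u := by
  obtain ⟨j, _, he⟩ := rootF_is_chain (par := par) (n.toNat + 1) u
  rw [RootN, he]; exact h_chain_le hwf hu j

theorem rootF_congr' {n : Int} {par par' : List Int} {h : Int → Nat} (hwf : WFh n par h)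
    (heq : ∀ u, Rng n u → pstep par u = pstep par' u) :
    ∀ (k : Nat) (u : Int), Rng n u → rootF k par u = rootF k par' u := by
  intro k
  induction k with
  | zero => intro u _; rfl
  | succ k ih =>
    intro u hu
    by_cases hf : pstep par u = u
    · rw [rootF_of_fix hf, rootF_of_fix (by rw [← heq u hu]; exact hf)]
    · rw [rootF_succ_of_ne hf, rootF_succ_of_ne (by rw [← heq u hu]; exact hf), heq u hu]
      rw [← heq u hu]
      exact ih _ (hwf.2.1 u hu)

theorem pstep_set {n : Int} {par : List Int} (hlen : par.length = n.toNat) {t : Int}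
    (ht : Rng n t) (r : Int) (u : Int) (hu : 0 ≤ u) :
    pstep (PySem.List.pySetD par t r) u = if u = t then r else pstep par u := by
  obtain ⟨ht0, ht1⟩ := ht
  have htl : t.toNat < par.length := by omega
  rw [PySem.List.pySetD_of_nonneg par r ht0]
  unfold pstep
  rw [show u = ((u.toNat : Nat) : Int) by omega, PySem.List.pyGetD_natCast,
      PySem.List.pyGetD_natCast]
  by_cases he : ((u.toNat : Nat) : Int) = t
  · have : u.toNat = t.toNat := by omega
    rw [if_pos he, this, List.getD_eq_getElem?_getD, List.getElem?_set_self (by omega)]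
    rfl
  · have hne : u.toNat ≠ t.toNat := by omega
    rw [if_neg he, List.getD_eq_getElem?_getD, List.getElem?_set_ne (by omega),
        ← List.getD_eq_getElem?_getD]

theorem length_pySetD' {par : List Int} {t r : Int} :
    (PySem.List.pySetD par t r).length = par.length :=
  PySem.List.length_pySetD par t r

theorem WFh_congr {n : Int} {par par' : List Int} {h : Int → Nat} (hwf : WFh n par h)
    (hlen : par'.length = par.length)
    (heq : ∀ u, Rng n u → pstep par' u = pstep par u) : WFh n par' h := by
  refine ⟨by rw [hlen]; exact hwf.1, ?_, ?_⟩
  · intro u hu; rw [heq u hu]; exact hwf.2.1 u hu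
  · intro u hu hne; rw [heq u hu] at *; exact hwf.2.2 u hu hne

theorem set_root_preserve {n : Int} {par : List Int} {h : Int → Nat} (hwf : WFh n par h)
    {t : Int} (ht : Rng n t) {r : Int} (hr : r = RootN n par t) :
    WFh n (PySem.List.pySetD par t r) h ∧
      ∀ v, Rng n v → RootN n (PySem.List.pySetD par t r) v = RootN n par v := by
  by_cases hfix : pstep par t = t
  · have hrt : r = t := by rw [hr, root_of_fix hfix]
    have hcong : ∀ u, Rng n u → pstep (PySem.List.pySetD par t r) u = pstep par u := by
      intro u hu
      rw [pstep_set hwf.1 ht r u hu.1]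
      by_cases he : u = t
      · subst he; rw [if_pos rfl, hrt, hfix]
      · rw [if_neg he]
    refine ⟨WFh_congr hwf length_pySetD' hcong, fun v hv => ?_⟩
    exact (rootF_congr' hwf (fun u hu => (hcong u hu).symm) _ v hv).symm
  · -- genuine compression: t non-root, r its root
    have hrr : Rng n r := hr ▸ root_rng hwf ht
    have hrfix : pstep par r = r := hr ▸ root_fix hwf ht
    have hrt : r ≠ t := fun he => hfix (he ▸ hrfix)
    have hhrt : h r < h t := by
      have h1 := root_step hwf ht
      have h2 := h_root_le hwf (hwf.2.1 t ht)
      have h3 := hwf.2.2 t ht hfix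
      rw [hr, h1]; omega
    have hset : ∀ u, Rng n u →
        pstep (PySem.List.pySetD par t r) u = if u = t then r else pstep par u :=
      fun u hu => pstep_set hwf.1 ht r u hu.1
    have hwf' : WFh n (PySem.List.pySetD par t r) h := by
      refine ⟨by rw [length_pySetD']; exact hwf.1, ?_, ?_⟩
      · intro u hu; rw [hset u hu]
        by_cases he : u = t
        · rw [if_pos he]; exact hrr
        · rw [if_neg he]; exact hwf.2.1 u hu
      · intro u hu hne; rw [hset u hu] at *
        by_cases he : u = t
        · subst he; rw [if_pos rfl]; exact hhrt
        · rw [if_neg he] at *; exact hwf.2.2 u hu hne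
    refine ⟨hwf', fun v hv => ?_⟩
    -- strong induction on h v
    have main : ∀ (m : Nat) (v : Int), Rng n v → h v ≤ m →
        RootN n (PySem.List.pySetD par t r) v = RootN n par v := by
      intro m
      induction m with
      | zero =>
        intro v hv hhv
        by_cases hvt : v = t
        · exfalso
          rw [hvt] at hhv; omega
        · by_cases hvf : pstep par v = v
          · rw [root_of_fix hvf, root_of_fix (by rw [hset v hv, if_neg hvt]; exact hvf)]
          · exfalso
            have := hwf.2.2 v hv hvf; omega
      | succ m ih =>
        intro v hv hhv
        by_cases hvt : v = t
        · have hst : pstep (PySem.List.pySetD par t r) v = r := by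
            rw [hset v hv, if_pos hvt]
          have hrf' : pstep (PySem.List.pySetD par t r) r = r := by
            rw [hset r hrr, if_neg hrt]; exact hrfix
          rw [root_step hwf' hv, hst, root_of_fix hrf', hr, hvt]
        · by_cases hvf : pstep par v = v
          · rw [root_of_fix hvf, root_of_fix (by rw [hset v hv, if_neg hvt]; exact hvf)]
          · have hst : pstep (PySem.List.pySetD par t r) v = pstep par v := by
              rw [hset v hv, if_neg hvt]
            have hdec := hwf.2.2 v hv hvf
            rw [root_step hwf' hv, hst, root_step hwf hv]
            exact ih (pstep par v) (hwf.2.1 v hv) (by omega)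
    exact main (h v) v hv (le_refl _)
theorem find_spec {n : Int} {h : Int → Nat} :
    ∀ (F : Nat) (par : List Int) (t : Int), WFh n par h → Rng n t →
    pstep par (rootF F par t) = rootF F par t →
    (dsuFind F par t).1 = RootN n par t ∧
    WFh n (dsuFind F par t).2 h ∧
    (∀ v, Rng n v → RootN n (dsuFind F par t).2 v = RootN n par v) ∧
    (∀ v, Rng n v → pstep (dsuFind F par t).2 v ≠ pstep par v → h v ≤ h t) := by
  intro F
  induction F with
  | zero =>
    intro par t hwf ht hfuel
    exact ⟨(root_eq_of_fuel hwf ht hfuel).symm ▸ rfl, hwf, fun v _ => rfl,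
      fun v _ hne => absurd rfl hne⟩
  | succ F ih =>
    intro par t hwf ht hfuel
    by_cases hfix : pstep par t = t
    · have : dsuFind (F+1) par t = (t, par) := by
        simp [dsuFind, show ¬(PySem.List.pyGetD par t 0 ≠ t) from not_not_intro hfix]
      rw [this]
      exact ⟨(root_of_fix hfix).symm, hwf, fun v _ => rfl, fun v _ hne => absurd rfl hne⟩
    · have hunf : dsuFind (F+1) par t =
          ((dsuFind F par (pstep par t)).1,
            PySem.List.pySetD (dsuFind F par (pstep par t)).2 t (dsuFind F par (pstep par t)).1) := by
        simp only [dsuFind, show (PySem.List.pyGetD par t 0 ≠ t) from hfix, if_true,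
          ne_eq, not_false_eq_true]
        rfl
      have hpt : Rng n (pstep par t) := hwf.2.1 t ht
      have hfuel' : pstep par (rootF F par (pstep par t)) = rootF F par (pstep par t) := by
        rw [← rootF_succ_of_ne hfix]; exact hfuel
      obtain ⟨h1, hwf1, hpres1, hwrt1⟩ := ih par (pstep par t) hwf hpt hfuel'
      set f := dsuFind F par (pstep par t) with hf
      have hdec := hwf.2.2 t ht hfix
      -- cell t untouched by the recursive call
      have hcell : pstep f.2 t = pstep par t := by
        by_contra hc
        have := hwrt1 t ht hc; omega
      -- f.1 is the root of t in f.2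
      have hr1 : f.1 = RootN n f.2 t := by
        rw [h1, ← hpres1 (pstep par t) hpt, root_step hwf1 ht, hcell]
      have hroott : (dsuFind (F+1) par t).1 = RootN n par t := by
        rw [hunf, h1, root_step hwf ht]
      obtain ⟨hwf2, hpres2⟩ := set_root_preserve hwf1 ht hr1
      refine ⟨hroott, by rw [hunf]; exact hwf2, ?_, ?_⟩
      · intro v hv
        rw [hunf]
        show RootN n (PySem.List.pySetD f.2 t f.1) v = RootN n par v
        rw [hpres2 v hv, hpres1 v hv]
      · intro v hv hne
        rw [hunf] at hne
        have hne' : pstep (PySem.List.pySetD f.2 t f.1) v ≠ pstep par v := hne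
        show h v ≤ h t
        have hsv : pstep (PySem.List.pySetD f.2 t f.1) v = if v = t then f.1 else pstep f.2 v :=
          pstep_set hwf1.1 ht f.1 v hv.1
        by_cases hvt : v = t
        · exact le_of_eq (congrArg h hvt)
        · rw [hsv, if_neg hvt] at hne'
          have : pstep f.2 v ≠ pstep par v := hne'
          have := hwrt1 v hv this
          omega

-- find with the fuel the ports use
theorem find_specN {n : Int} {h : Int → Nat} {par : List Int} {t : Int}
    (hwf : WFh n par h) (ht : Rng n t) :
    (dsuFind (n.toNat+1) par t).1 = RootN n par t ∧
    WFh n (dsuFind (n.toNat+1) par t).2 h ∧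
    (∀ v, Rng n v → RootN n (dsuFind (n.toNat+1) par t).2 v = RootN n par v) :=
  (find_spec (n.toNat+1) par t hwf ht (root_fix hwf ht)).imp id (fun x => x.imp id (fun y => y.1))

theorem union_spec {n : Int} {h : Int → Nat} {par : List Int} {c p : Int}
    (hwf : WFh n par h) (hc : Rng n c) (hp : Rng n p)
    (hne : RootN n par c ≠ RootN n par p) :
    ∃ h', WFh n (dsuUnion (n.toNat+1) par c p) h' ∧
      ∀ v, Rng n v → RootN n (dsuUnion (n.toNat+1) par c p) v =
        (if RootN n par v = RootN n par c then RootN n par p else RootN n par v) := by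
  obtain ⟨h1, hwf1, hpres1⟩ := find_specN hwf hc
  set f := dsuFind (n.toNat+1) par c with hfdef
  set rc := RootN n par c with hrc
  set rp := RootN n par p with hrp
  have hrcr : Rng n rc := root_rng hwf hc
  have hrpr : Rng n rp := root_rng hwf hp
  have hrcfix1 : pstep f.2 rc = rc := by
    have := root_fix hwf1 hc
    rwa [hpres1 c hc, ← hrc] at this
  have hrq1 : ∀ v, Rng n v → RootN n f.2 v = RootN n par v := hpres1
  have hprc : p ≠ rc := by
    intro he
    apply hne
    have h3 : RootN n par rc = rc := root_of_fix (root_fix hwf hc)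
    have h4 : rp = rc := by rw [hrp, he]; exact h3
    exact h4.symm
  have hq' : dsuUnion (n.toNat+1) par c p = PySem.List.pySetD f.2 rc p := by
    have h0 : dsuUnion (n.toNat+1) par c p = PySem.List.pySetD f.2 f.1 p := rfl
    rw [h0, h1]
  set q' := PySem.List.pySetD f.2 rc p with hq'def
  have hsv : ∀ u, Rng n u → pstep q' u = if u = rc then p else pstep f.2 u :=
    fun u hu => pstep_set hwf1.1 hrcr p u hu.1
  have hrpq1 : RootN n f.2 p = rp := hrq1 p hp
  have hrcq1 : RootN n f.2 rc = rc := by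
    rw [hrq1 rc hrcr]
    exact root_of_fix (root_fix hwf hc)
  have hrprc : rp ≠ rc := fun he => hne he.symm
  classical
  set h' : Int → Nat := fun v => if RootN n f.2 v = rc then h v + h p + 1 else h v with hh'
  have hh'rc : h' rc = h rc + h p + 1 := by rw [hh']; simp [hrcq1]
  have hh'p : h' p = h p := by rw [hh']; simp [hrpq1, hrprc]
  have hwfq : WFh n q' h' := by
    refine ⟨by rw [hq'def, length_pySetD']; exact hwf1.1, ?_, ?_⟩
    · intro u hu; rw [hsv u hu]
      by_cases he : u = rc
      · rw [if_pos he]; exact hp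
      · rw [if_neg he]; exact hwf1.2.1 u hu
    · intro u hu hnf
      rw [hsv u hu] at hnf ⊢
      by_cases he : u = rc
      · rw [if_pos he] at *
        rw [he, hh'rc, hh'p]; omega
      · rw [if_neg he] at *
        have hd := hwf1.2.2 u hu hnf
        have hsame : RootN n f.2 (pstep f.2 u) = RootN n f.2 u := (root_step hwf1 hu).symm
        rw [hh']
        simp only [hsame]
        by_cases hb : RootN n f.2 u = rc <;> simp [hb] <;> omega
  refine ⟨h', by rw [hq']; exact hwfq, ?_⟩
  have main : ∀ (m : Nat) (v : Int), Rng n v → h' v ≤ m →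
      RootN n q' v = (if RootN n f.2 v = rc then rp else RootN n f.2 v) := by
    intro m
    induction m with
    | zero =>
      intro v hv hm
      by_cases hvrc : v = rc
      · exfalso; rw [hvrc, hh'rc] at hm; omega
      · by_cases hvf : pstep f.2 v = v
        · have : pstep q' v = v := by rw [hsv v hv, if_neg hvrc]; exact hvf
          rw [root_of_fix this, root_of_fix hvf]
          have : RootN n f.2 v = v := root_of_fix hvf
          by_cases hb : RootN n f.2 v = rc
          · exfalso; exact hvrc (by rw [← this, hb])
          · rw [if_neg (this ▸ hb)]
        · exfalso
          have hd := hwf1.2.2 v hv hvf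
          have hsame : RootN n f.2 (pstep f.2 v) = RootN n f.2 v := (root_step hwf1 hv).symm
          rw [hh'] at hm
          by_cases hb : RootN n f.2 v = rc <;> simp [hb] at hm <;> omega
    | succ m ih =>
      intro v hv hm
      by_cases hvrc : v = rc
      · have hstep : pstep q' v = p := by rw [hsv v hv, if_pos hvrc]
        rw [root_step hwfq hv, hstep]
        have h2 : h' p ≤ m := by rw [hh'p]; rw [hvrc, hh'rc] at hm; omega
        rw [ih p hp h2, hrpq1, if_neg hrprc, hvrc, hrcq1, if_pos rfl]
      · by_cases hvf : pstep f.2 v = v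
        · have : pstep q' v = v := by rw [hsv v hv, if_neg hvrc]; exact hvf
          rw [root_of_fix this, root_of_fix hvf]
          have hfx : RootN n f.2 v = v := root_of_fix hvf
          rw [if_neg (hfx ▸ hvrc)]
        · have hstep : pstep q' v = pstep f.2 v := by rw [hsv v hv, if_neg hvrc]
          have hd := hwf1.2.2 v hv hvf
          have hsame : RootN n f.2 (pstep f.2 v) = RootN n f.2 v := (root_step hwf1 hv).symm
          have hm' : h' (pstep f.2 v) ≤ m := by
            rw [hh'] at hm ⊢
            simp only [hsame]
            by_cases hb : RootN n f.2 v = rc <;> simp [hb] at hm ⊢ <;> omega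
          rw [root_step hwfq hv, hstep, ih (pstep f.2 v) (hwf1.2.1 v hv) hm', hsame,
              root_step hwf1 hv, hsame]
  intro v hv
  have := main (h' v) v hv (le_refl _)
  rw [hq', this, hrq1 v hv]
-- ===== B-side component-dict machinery =====

def mkComp (n : Int) (lab : Int → Int) : PySem.Dict Int Int :=
  PySem.Dict.mk ((PySem.List.pyRange 0 n 1).map (fun v => (v, lab v)))

theorem foldl_insert_fresh : ∀ (l : List Int) (d : PySem.Dict Int Int),
    l.Nodup → (∀ v ∈ l, d.contains v = false) →
    l.foldl (fun d v => d.insert v v) d = PySem.Dict.mk (d.items ++ l.map (fun v => (v, v))) := by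
  intro l
  induction l with
  | nil => intro d _ _; simp
  | cons x l ih =>
    intro d hnd hc
    have hx : d.contains x = false := hc x (List.mem_cons_self)
    have hins : d.insert x x = PySem.Dict.mk (d.items ++ [(x, x)]) := by
      have := PySem.Dict.items_insert_of_not_contains d x hx
      cases hd : d.insert x x
      rw [← this, ← hd]
    show (l.foldl (fun d v => d.insert v v) (d.insert x x)) = _
    rw [hins, ih _ (List.nodup_cons.1 hnd).2 ?_]
    · simp
    · intro v hv
      rw [PySem.Dict.contains_mk]
      have h1 : d.contains v = false := hc v (List.mem_cons_of_mem _ hv)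
      rw [PySem.Dict.contains_mk] at h1
      simp only [List.any_append, List.any_cons, List.any_nil, Bool.or_false]
      have hvx : v ≠ x := fun he => (List.nodup_cons.1 hnd).1 (he ▸ hv)
      simp [h1, Ne.symm hvx]

theorem comp0_eq (n : Int) :
    (PySem.List.pyRange 0 n 1).foldl (fun d v => PySem.Dict.insert d v v) PySem.Dict.empty =
      mkComp n (fun x => x) := by
  rw [foldl_insert_fresh _ _ (PySem.List.nodup_pyRange_one 0 n) (fun v _ => rfl)]
  rfl

theorem getD_mkComp {n : Int} (lab : Int → Int) {u : Int} (hu : Rng n u) :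
    PySem.Dict.getD (mkComp n lab) u 0 = lab u := by
  have hmem : u ∈ PySem.List.pyRange 0 n 1 := (PySem.List.mem_pyRange_one).2 ⟨hu.1, hu.2⟩
  unfold mkComp
  have : ∀ (l : List Int), u ∈ l →
      PySem.Dict.getD (PySem.Dict.mk (l.map (fun v => (v, lab v)))) u 0 = lab u := by
    intro l
    induction l with
    | nil => intro h; cases h
    | cons x l ih =>
      intro h
      rw [PySem.Dict.getD_eq_get?_getD]
      simp only [List.map_cons]
      rw [PySem.Dict.get?_mk_cons]
      by_cases he : x = u
      · simp [he]
      · simp only [beq_iff_eq, he, if_false]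
        rw [← PySem.Dict.getD_eq_get?_getD]
        rcases List.mem_cons.mp h with h' | h'
        · exact absurd h'.symm he
        · exact ih h' 
  exact this _ hmem

theorem mergeB_spec {n : Int} (lab : Int → Int) {u v : Int} (hu : Rng n u) (hv : Rng n v) :
    mergeB (mkComp n lab) u v =
      (if lab u = lab v then (mkComp n lab, false)
       else (mkComp n (fun x => if lab x = lab v then lab u else lab x), true)) := by
  unfold mergeB
  rw [getD_mkComp lab hu, getD_mkComp lab hv]
  by_cases he : lab u = lab v
  · simp [he]
  · simp only [he, if_false]
    congr 1
    show PySem.Dict.mk (((PySem.List.pyRange 0 n 1).map (fun x => (x, lab x))).map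
        (fun kc => if kc.2 = lab v then (kc.1, lab u) else kc)) = _
    unfold mkComp
    rw [List.map_map]
    apply congrArg
    apply List.map_congr_left
    intro x _
    by_cases hx : lab x = lab v
    · simp [Function.comp, hx]
    · simp [Function.comp, hx]

theorem values_mkComp (n : Int) (lab : Int → Int) :
    PySem.Dict.values (mkComp n lab) = (PySem.List.pyRange 0 n 1).map lab := by
  show ((PySem.List.pyRange 0 n 1).map (fun v => (v, lab v))).map (fun x => x.2) = _
  rw [List.map_map]
  rfl

-- the partition relation between A's DSU forest and B's label map
def PR (n : Int) (par : List Int) (lab : Int → Int) : Prop :=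
  ∀ u v, Rng n u → Rng n v → (RootN n par u = RootN n par v ↔ lab u = lab v)

theorem PR_merge {n : Int} {par par' : List Int} {lab : Int → Int} {u v : Int}
    (hu : Rng n u) (hv : Rng n v) (hPR : PR n par lab)
    (hne : RootN n par u ≠ RootN n par v)
    (hroot' : ∀ x, Rng n x → RootN n par' x =
      (if RootN n par x = RootN n par u then RootN n par v else RootN n par x)) :
    PR n par' (fun x => if lab x = lab v then lab u else lab x) := by
  intro x y hx hy
  have hxy := hPR x y hx hy
  have hxu := hPR x u hx hu
  have hxv := hPR x v hx hv
  have hyu := hPR y u hy hu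
  have hyv := hPR y v hy hv
  have hlne : lab u ≠ lab v := fun he => hne ((hPR u v hu hv).2 he)
  rw [hroot' x hx, hroot' y hy]
  by_cases c1 : RootN n par x = RootN n par u <;> by_cases c2 : RootN n par y = RootN n par u
  · -- both in u's class
    have h2 : lab x = lab u := hxu.1 c1
    have h3 : lab y = lab u := hyu.1 c2
    simp [c1, c2, h2, h3, hlne]
  · have h2 : lab x = lab u := hxu.1 c1
    have hxne : ¬ lab x = lab v := by rw [h2]; exact hlne
    simp only [c1, c2, if_true, if_false, h2, if_neg hlne]
    by_cases c3 : lab y = lab v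
    · simp only [if_pos c3]
      exact ⟨fun _ => trivial, fun _ => (hyv.2 c3).symm⟩
    · simp only [if_neg c3]
      exact ⟨fun hq => absurd (hyv.1 hq.symm) c3, fun hq => absurd (hyu.2 hq.symm) c2⟩
  · have h3 : lab y = lab u := hyu.1 c2
    have hyne : ¬ lab y = lab v := by rw [h3]; exact hlne
    simp only [c1, c2, if_true, if_false, h3, if_neg hlne]
    by_cases c3 : lab x = lab v
    · simp only [if_pos c3]
      exact ⟨fun _ => trivial, fun _ => hxv.2 c3⟩
    · simp only [if_neg c3]
      exact ⟨fun hq => absurd (hxv.1 hq) c3, fun hq => absurd (hxu.2 hq) c1⟩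
  · simp only [c1, c2, if_false]
    by_cases c3 : lab x = lab v <;> by_cases c4 : lab y = lab v
    · simp only [if_pos c3, if_pos c4]
      exact ⟨fun _ => trivial, fun _ => hxy.2 (c3.trans c4.symm)⟩
    · simp only [if_pos c3, if_neg c4]
      constructor
      · intro hq; exact absurd ((hxy.1 hq).symm.trans c3) c4
      · intro hq; exact absurd (hyu.2 hq.symm) c2
    · simp only [if_neg c3, if_pos c4]
      constructor
      · intro hq; exact absurd ((hxy.1 hq).trans c4) c3
      · intro hq; exact absurd (hxu.2 hq) c1
    · simp only [if_neg c3, if_neg c4]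
      exact hxy
-- ===== simulation of one Kruskal scan =====

def toQuad (p : Int × List Int) : List Int :=
  [PySem.List.pyGetD p.2 0 0, PySem.List.pyGetD p.2 1 0, PySem.List.pyGetD p.2 2 0, p.1]

def EOK (n : Int) (p : Int × List Int) : Prop :=
  Rng n (PySem.List.pyGetD p.2 0 0) ∧ Rng n (PySem.List.pyGetD p.2 1 0)

theorem quad_get0 (p : Int × List Int) : PySem.List.pyGetD (toQuad p) 0 0 = PySem.List.pyGetD p.2 0 0 := by
  simp [toQuad, pysem]
theorem quad_get1 (p : Int × List Int) : PySem.List.pyGetD (toQuad p) 1 0 = PySem.List.pyGetD p.2 1 0 := by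
  simp [toQuad, pysem]
theorem quad_get2 (p : Int × List Int) : PySem.List.pyGetD (toQuad p) 2 0 = PySem.List.pyGetD p.2 2 0 := by
  simp [toQuad, pysem]
theorem quad_get3 (p : Int × List Int) : PySem.List.pyGetD (toQuad p) 3 0 = p.1 := by
  simp [toQuad, pysem]

def stepA (F : Nat) (st : List Int × Int) (e : List Int) : List Int × Int :=
  let f1 := dsuFind F st.1 (PySem.List.pyGetD e 0 0)
  let f2 := dsuFind F f1.2 (PySem.List.pyGetD e 1 0)
  if f1.1 ≠ f2.1 then
    (dsuUnion F f2.2 (PySem.List.pyGetD e 0 0) (PySem.List.pyGetD e 1 0),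
     st.2 + PySem.List.pyGetD e 2 0)
  else (f2.2, st.2)

def stepB (st : PySem.Dict Int Int × Int) (p : Int × List Int) : PySem.Dict Int Int × Int :=
  let m := mergeB st.1 (PySem.List.pyGetD p.2 0 0) (PySem.List.pyGetD p.2 1 0)
  if m.2 then (m.1, st.2 + PySem.List.pyGetD p.2 2 0) else (m.1, st.2)

theorem PR_congr {n : Int} {par par' : List Int} {lab : Int → Int}
    (hpres : ∀ x, Rng n x → RootN n par' x = RootN n par x) (hPR : PR n par lab) :
    PR n par' lab := by
  intro x y hx hy
  rw [hpres x hx, hpres y hy]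
  exact hPR x y hx hy

theorem stepA_sim {n : Int} {h : Int → Nat} {par : List Int} {lab : Int → Int} {cost : Int}
    (hwf : WFh n par h) (hPR : PR n par lab) {p : Int × List Int} (hp : EOK n p) :
    ∃ h' lab' par' c',
      stepA (n.toNat+1) (par, cost) (toQuad p) = (par', c') ∧
      stepB (mkComp n lab, cost) p = (mkComp n lab', c') ∧
      WFh n par' h' ∧ PR n par' lab' := by
  obtain ⟨hu, hv⟩ := hp
  set u := PySem.List.pyGetD p.2 0 0 with hudef
  set v := PySem.List.pyGetD p.2 1 0 with hvdef
  have hAq : stepA (n.toNat+1) (par, cost) (toQuad p) =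
      (let f1 := dsuFind (n.toNat+1) par u
       let f2 := dsuFind (n.toNat+1) f1.2 v
       if f1.1 ≠ f2.1 then
         (dsuUnion (n.toNat+1) f2.2 u v, cost + PySem.List.pyGetD p.2 2 0)
       else (f2.2, cost)) := by
    unfold stepA
    rw [quad_get0, quad_get1, quad_get2]
  obtain ⟨hf1r, hwf1, hpres1⟩ := find_specN hwf hu
  set f1 := dsuFind (n.toNat+1) par u with hf1def
  obtain ⟨hf2r, hwf2, hpres2⟩ := find_specN hwf1 hv
  set f2 := dsuFind (n.toNat+1) f1.2 v with hf2def
  have hpres12 : ∀ x, Rng n x → RootN n f2.2 x = RootN n par x := by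
    intro x hx; rw [hpres2 x hx, hpres1 x hx]
  have hguard : (f1.1 ≠ f2.1) ↔ ¬ (lab u = lab v) := by
    rw [hf1r, hf2r, hpres1 v hv]
    exact not_congr (hPR u v hu hv)
  have hB : stepB (mkComp n lab, cost) p =
      (if lab u = lab v then (mkComp n lab, cost)
       else (mkComp n (fun x => if lab x = lab v then lab u else lab x),
             cost + PySem.List.pyGetD p.2 2 0)) := by
    unfold stepB
    rw [show mergeB (mkComp n lab) u v = _ from mergeB_spec lab hu hv]
    by_cases he : lab u = lab v <;> simp [he]
  by_cases he : lab u = lab v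
  · refine ⟨h, lab, f2.2, cost, ?_, ?_, hwf2, PR_congr hpres12 hPR⟩
    · rw [hAq]
      simp only [← hf1def, ← hf2def]
      rw [if_neg (by rw [hguard]; exact not_not_intro he)]
    · rw [hB, if_pos he]
  · have hrne : RootN n f2.2 u ≠ RootN n f2.2 v := by
      rw [hpres12 u hu, hpres12 v hv]
      exact fun hq => he ((hPR u v hu hv).1 hq)
    obtain ⟨h', hwf', hroot'⟩ := union_spec hwf2 hu hv hrne
    refine ⟨h', fun x => if lab x = lab v then lab u else lab x,
      dsuUnion (n.toNat+1) f2.2 u v, cost + PySem.List.pyGetD p.2 2 0, ?_, ?_, hwf', ?_⟩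
    · rw [hAq]
      simp only [← hf1def, ← hf2def]
      rw [if_pos (hguard.2 he)]
    · rw [hB, if_neg he]
    · refine PR_merge hu hv hPR (fun hq => he ((hPR u v hu hv).1 hq)) ?_
      intro x hx
      rw [hroot' x hx, hpres12 x hx, hpres12 u hu, hpres12 v hv]

theorem loop_sim {n : Int} :
    ∀ (lst : List (Int × List Int)), (∀ p ∈ lst, EOK n p) →
    ∀ (par : List Int) (lab : Int → Int) (cost : Int) (h : Int → Nat),
    WFh n par h → PR n par lab →
    ∃ h' lab' par' c',
      (lst.map toQuad).foldl (stepA (n.toNat+1)) (par, cost) = (par', c') ∧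
      lst.foldl stepB (mkComp n lab, cost) = (mkComp n lab', c') ∧
      WFh n par' h' ∧ PR n par' lab' := by
  intro lst
  induction lst with
  | nil =>
    intro _ par lab cost h hwf hPR
    exact ⟨h, lab, par, cost, rfl, rfl, hwf, hPR⟩
  | cons p lst ih =>
    intro hok par lab cost h hwf hPR
    obtain ⟨h1, lab1, par1, c1, hA1, hB1, hwf1, hPR1⟩ :=
      stepA_sim hwf hPR (hok p List.mem_cons_self)
    obtain ⟨h', lab', par', c', hA2, hB2, hwf', hPR'⟩ :=
      ih (fun q hq => hok q (List.mem_cons_of_mem _ hq)) par1 lab1 c1 h1 hwf1 hPR1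
    refine ⟨h', lab', par', c', ?_, ?_, hwf', hPR'⟩
    · rw [List.map_cons, List.foldl_cons, hA1, hA2]
    · rw [List.foldl_cons, hB1, hB2]
-- ===== connectivity check and full mst-run equality =====

theorem connA_spec {n : Int} {h : Int → Nat} (h0 : Rng n 0) :
    ∀ (l : List Int), (∀ i ∈ l, Rng n i) →
    ∀ (par : List Int) (cost : Int), WFh n par h →
    connA (n.toNat+1) par cost l =
      (if ∀ i ∈ l, RootN n par i = RootN n par 0 then some cost else none) := by
  intro l
  induction l with
  | nil => intro _ par cost _; simp [connA]
  | cons i l ih =>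
    intro hl par cost hwf
    have hi : Rng n i := hl i List.mem_cons_self
    obtain ⟨hr1, hwf1, hpres1⟩ := find_specN hwf hi
    set f1 := dsuFind (n.toNat+1) par i with hf1
    obtain ⟨hr2, hwf2, hpres2⟩ := find_specN hwf1 h0
    set f2 := dsuFind (n.toNat+1) f1.2 0 with hf2
    have hpres12 : ∀ x, Rng n x → RootN n f2.2 x = RootN n par x := by
      intro x hx; rw [hpres2 x hx, hpres1 x hx]
    have hcon : connA (n.toNat+1) par cost (i :: l) =
        (if f1.1 ≠ f2.1 then none else connA (n.toNat+1) f2.2 cost l) := by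
      rfl
    rw [hcon]
    have hiff : f1.1 = f2.1 ↔ RootN n par i = RootN n par 0 := by
      rw [hr1, hr2, hpres1 0 h0]
    by_cases hq : RootN n par i = RootN n par 0
    · rw [if_neg (not_not_intro (hiff.2 hq))]
      rw [ih (fun j hj => hl j (List.mem_cons_of_mem _ hj)) f2.2 cost hwf2]
      by_cases hall : ∀ j ∈ l, RootN n par j = RootN n par 0
      · rw [if_pos, if_pos]
        · intro j hj
          rcases List.mem_cons.mp hj with he | he
          · rw [he]; exact hq
          · exact hall j he
        · intro j hj
          rw [hpres12 j (hl j (List.mem_cons_of_mem _ hj)), hpres12 0 h0]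
          exact hall j hj
      · rw [if_neg, if_neg]
        · intro hc
          exact hall (fun j hj => hc j (List.mem_cons_of_mem _ hj))
        · intro hc
          apply hall
          intro j hj
          have := hc j hj
          rwa [hpres12 j (hl j (List.mem_cons_of_mem _ hj)), hpres12 0 h0] at this
    · rw [if_pos (fun hc => hq (hiff.1 hc)), if_neg]
      intro hc
      exact hq (hc i List.mem_cons_self)

theorem pstep_id {n u : Int} (hu : Rng n u) : pstep (PySem.List.pyRange 0 n 1) u = u := by
  unfold pstep
  obtain ⟨h1, h2⟩ := hu
  have hlen : (PySem.List.pyRange 0 n 1).length = (n - 0).toNat := PySem.List.length_pyRange_one 0 n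
  rw [show u = ((u.toNat : Nat) : Int) by omega, PySem.List.pyGetD_natCast]
  rw [List.getD_eq_getElem?_getD, List.getElem?_eq_getElem (by omega)]
  rw [PySem.List.getElem_pyRange_one]
  simp

theorem WFh_id (n : Int) : WFh n (PySem.List.pyRange 0 n 1) (fun _ => 0) := by
  refine ⟨by rw [PySem.List.length_pyRange_one]; omega, ?_, ?_⟩
  · intro u hu; rw [pstep_id hu]; exact hu
  · intro u hu hne; exact absurd (pstep_id hu) hne

theorem root_id {n u : Int} (hu : Rng n u) : RootN n (PySem.List.pyRange 0 n 1) u = u :=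
  root_of_fix (pstep_id hu)

theorem PR_id (n : Int) : PR n (PySem.List.pyRange 0 n 1) (fun x => x) := by
  intro x y hx hy
  rw [root_id hx, root_id hy]

theorem dsuFind_fix {par : List Int} {t : Int} (hf : pstep par t = t) (F : Nat) :
    dsuFind (F+1) par t = (t, par) := by
  simp [dsuFind, show ¬ (PySem.List.pyGetD par t 0 ≠ t) from not_not_intro hf]

-- the forced seed union: A on the identity DSU vs B's first merge
theorem forced_setup {n : Int} {u v : Int} (hu : Rng n u) (hv : Rng n v) :
    ∃ h1 lab1,
      dsuUnion (n.toNat+1) (PySem.List.pyRange 0 n 1) u v = (dsuUnion (n.toNat+1) (PySem.List.pyRange 0 n 1) u v) ∧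
      (mergeB (mkComp n (fun x => x)) u v).1 = mkComp n lab1 ∧
      WFh n (dsuUnion (n.toNat+1) (PySem.List.pyRange 0 n 1) u v) h1 ∧
      PR n (dsuUnion (n.toNat+1) (PySem.List.pyRange 0 n 1) u v) lab1 := by
  have hmB := mergeB_spec (n := n) (fun x => x) hu hv
  by_cases he : u = v
  · -- self-loop: A writes parent[u] := u, a no-op for pstep; B does not merge
    have hun : dsuUnion (n.toNat+1) (PySem.List.pyRange 0 n 1) u v =
        PySem.List.pySetD (PySem.List.pyRange 0 n 1) u v := by
      have h0 : dsuUnion (n.toNat+1) (PySem.List.pyRange 0 n 1) u v =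
          PySem.List.pySetD (dsuFind (n.toNat+1) (PySem.List.pyRange 0 n 1) u).2
            (dsuFind (n.toNat+1) (PySem.List.pyRange 0 n 1) u).1 v := rfl
      rw [h0, dsuFind_fix (pstep_id hu)]
    have hcong : ∀ x, Rng n x →
        pstep (PySem.List.pySetD (PySem.List.pyRange 0 n 1) u v) x = pstep (PySem.List.pyRange 0 n 1) x := by
      intro x hx
      rw [pstep_set (WFh_id n).1 hu v x hx.1]
      by_cases hxu : x = u
      · rw [if_pos hxu, pstep_id hx, hxu, ← he]
      · rw [if_neg hxu]
    refine ⟨(fun _ => 0), (fun x => x), rfl, ?_, ?_, ?_⟩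
    · rw [hmB, if_pos (by rw [he])]
    · rw [hun]
      exact WFh_congr (WFh_id n) (by rw [length_pySetD']) hcong
    · rw [hun]
      have hwf' := WFh_congr (WFh_id n) (by rw [length_pySetD']) hcong
      refine PR_congr (par := PySem.List.pyRange 0 n 1) ?_ (PR_id n)
      intro x hx
      unfold RootN
      exact rootF_congr' hwf' (fun w hw => hcong w hw) _ x hx
  · have hrne : RootN n (PySem.List.pyRange 0 n 1) u ≠ RootN n (PySem.List.pyRange 0 n 1) v := by
      rw [root_id hu, root_id hv]; exact he
    obtain ⟨h1, hwf1, hroot1⟩ := union_spec (WFh_id n) hu hv hrne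
    refine ⟨h1, (fun x => if x = v then u else x), rfl, ?_, hwf1, ?_⟩
    · rw [hmB, if_neg he]
    · refine PR_merge hu hv (PR_id n) hrne ?_
      intro x hx
      rw [hroot1 x hx, root_id hx, root_id hu, root_id hv]
theorem mstA_eq (n : Int) (sedges : List (List Int)) (start : Int) (h : ¬ sedges.length = 0) :
    mstA n sedges start =
      (let F := n.toNat + 1
       let se := PySem.List.pyGetD sedges start []
       let parent1 := dsuUnion F (PySem.List.pyRange 0 n 1)
           (PySem.List.pyGetD se 0 0) (PySem.List.pyGetD se 1 0)
       let st := sedges.foldl (stepA F) (parent1, PySem.List.pyGetD se 2 0)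
       connA F st.1 st.2 (PySem.List.pyRange 0 n 1)) := by
  unfold mstA
  rw [if_neg h]
  rfl

theorem kruskalB_eq (n : Int) (lst : List (Int × List Int)) (forced : Int × List Int) :
    kruskalB n lst forced =
      (let m1 := mergeB (mkComp n (fun x => x))
           (PySem.List.pyGetD forced.2 0 0) (PySem.List.pyGetD forced.2 1 0)
       let st := lst.foldl stepB (m1.1, PySem.List.pyGetD forced.2 2 0)
       let root := PySem.Dict.getD st.1 0 0
       if (PySem.Dict.values st.1).any (fun c => c ≠ root) then none else some st.2) := by
  unfold kruskalB
  rw [comp0_eq]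
  rfl

theorem run_eq {n : Int} (hn : 1 ≤ n) (lst : List (Int × List Int)) (hlst : ∀ p ∈ lst, EOK n p)
    (start : Nat) (hs : start < lst.length) :
    mstA n (lst.map toQuad) ((start : Nat) : Int) = kruskalB n lst lst[start] := by
  have h0 : Rng n 0 := ⟨le_refl 0, hn⟩
  have hlen : ¬ (lst.map toQuad).length = 0 := by
    rw [List.length_map]; omega
  have hse : PySem.List.pyGetD (lst.map toQuad) ((start : Nat) : Int) [] = toQuad lst[start] := by
    rw [PySem.List.pyGetD_natCast, List.getD_eq_getElem?_getD, List.getElem?_map,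
        List.getElem?_eq_getElem hs]
    rfl
  rw [mstA_eq _ _ _ hlen, kruskalB_eq]
  simp only [hse, quad_get0, quad_get1, quad_get2]
  have hEOK := hlst lst[start] (List.getElem_mem hs)
  obtain ⟨hu, hv⟩ := hEOK
  obtain ⟨h1, lab1, _, hm1, hwf1, hPR1⟩ := forced_setup hu hv
  rw [hm1]
  obtain ⟨h', lab', par', c', hA, hB, hwf', hPR'⟩ :=
    loop_sim lst hlst _ lab1 (PySem.List.pyGetD lst[start].2 2 0) h1 hwf1 hPR1
  rw [hA, hB]
  simp only
  rw [connA_spec h0 (PySem.List.pyRange 0 n 1)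
      (fun i hi => by
        obtain ⟨hi1, hi2⟩ := (PySem.List.mem_pyRange_one).1 hi
        exact ⟨hi1, hi2⟩)
      par' c' hwf']
  rw [getD_mkComp lab' h0, values_mkComp, List.any_map]
  by_cases hall : ∀ i ∈ PySem.List.pyRange 0 n 1, RootN n par' i = RootN n par' 0
  · rw [if_pos hall, if_neg]
    simp only [List.any_eq_true, not_exists, not_and]
    intro i hi
    have hir : Rng n i := (PySem.List.mem_pyRange_one).1 hi
    have := (hPR' i 0 hir h0).1 (hall i hi)
    simp [this]
  · rw [if_neg hall, if_pos]
    simp only [List.any_eq_true]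
    rcases not_forall.mp hall with ⟨i, hi⟩
    rcases Classical.not_imp.mp hi with ⟨him, hine⟩
    have hir : Rng n i := (PySem.List.mem_pyRange_one).1 him
    refine ⟨i, him, ?_⟩
    simp only [Function.comp, ne_eq, decide_eq_true_eq]
    exact fun he => hine ((hPR' i 0 hir h0).2 he)
-- ===== driver machinery =====

theorem insertBy_map {α β : Type} (f : α → β) (bf : β → β → Bool) (bg : α → α → Bool)
    (hb : ∀ a b, bf (f a) (f b) = bg a b) (x : α) :
    ∀ (l : List α), PySem.List.insertBy bf (f x) (l.map f) = (PySem.List.insertBy bg x l).map f := by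
  intro l
  induction l with
  | nil => rfl
  | cons y l ih =>
    show PySem.List.insertBy bf (f x) (f y :: l.map f) = _
    rw [PySem.List.insertBy, PySem.List.insertBy, hb]
    by_cases hc : bg x y = true
    · simp [hc]
    · simp only [Bool.not_eq_true] at hc
      simp [hc, ih]

theorem sorted_map_comm {α β κ : Type} [LT κ] [DecidableLT κ] (f : α → β)
    (kf : β → κ) (kg : α → κ) (hk : ∀ a, kf (f a) = kg a) (l : List α) :
    PySem.List.sorted (l.map f) kf false = (PySem.List.sorted l kg false).map f := by
  rw [PySem.List.sorted_eq_foldl_insertBy, PySem.List.sorted_eq_foldl_insertBy, List.foldl_map]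
  have main : ∀ (l' : List α) (acc : List α),
      l'.foldl (fun acc x => PySem.List.insertBy (fun a b => decide (kf a < kf b)) (f x) acc)
        (acc.map f) =
      (l'.foldl (fun acc x => PySem.List.insertBy (fun a b => decide (kg a < kg b)) x acc) acc).map f := by
    intro l'
    induction l' with
    | nil => intro acc; rfl
    | cons x l' ih =>
      intro acc
      show l'.foldl _ (PySem.List.insertBy _ (f x) (acc.map f)) = _
      rw [insertBy_map f _ (fun a b => decide (kg a < kg b)) (fun a b => by rw [hk, hk]) x acc]
      exact ih _
  exact main l []

theorem enumerate_map {α β : Type} (f : α → β) :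
    ∀ (l : List α) (s : Int), PySem.List.enumerate (l.map f) s =
      (PySem.List.enumerate l s).map (fun p => (p.1, f p.2)) := by
  intro l
  induction l with
  | nil => intro s; rfl
  | cons x l ih =>
    intro s
    rw [List.map_cons, PySem.List.enumerate_cons, PySem.List.enumerate_cons, ih, List.map_cons]

theorem getElem_not_mem_take {α : Type} {l : List α} (hnd : l.Nodup) {k : Nat}
    (hk : k < l.length) : l[k] ∉ l.take k := by
  intro hmem
  have hsplit : l = l.take k ++ l[k] :: l.drop (k+1) := by
    rw [List.getElem_cons_drop, List.take_append_drop]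
  rw [hsplit] at hnd
  have := (List.nodup_append.1 hnd).2.2
  exact this l[k] hmem l[k] List.mem_cons_self rfl

theorem drop_head_eq {α : Type} {l : List α} {k : Nat} (hk : k < l.length) :
    l.drop k = l[k] :: l.drop (k+1) := (List.getElem_cons_drop hk).symm

-- pop then insert restores the list
theorem insert_eraseIdx {α : Type} (l : List α) (k : Nat) (hk : k < l.length) :
    PySem.List.insert (l.eraseIdx k) ((k : Nat) : Int) l[k] = l := by
  have hlen : k ≤ (l.eraseIdx k).length := by
    rw [List.length_eraseIdx_of_lt hk]; omega
  rw [PySem.List.insert_natCast _ _ _ hlen, List.eraseIdx_eq_take_drop_succ,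
      List.take_append_of_le_length (by rw [List.length_take]; omega),
      List.take_take, min_self]
  conv_rhs => rw [← List.take_append_drop k l, ← List.getElem_cons_drop hk]
  congr 1
  rw [List.drop_append_of_le_length (by rw [List.length_take]; omega)]
  rw [List.drop_eq_nil_of_le (by rw [List.length_take]; omega), List.nil_append]
-- ===== driver fold =====

def drvA (n : Int) (cost : Option Int) (st : List (List Int) × PySem.Set Int × PySem.Set Int)
    (ie : Int × List Int) : List (List Int) × PySem.Set Int × PySem.Set Int :=
  match PySem.List.pop? st.1 ie.1 with
  | none => st
  | some (tmp, rest) =>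
    let crit := if pyGtI (mstA n rest 0) cost
                then PySem.Set.add st.2.1 (PySem.List.pyGetD ie.2 3 0) else st.2.1
    let s2 := PySem.List.insert rest ie.1 tmp
    let pseudo := if pyEqI (mstA n s2 ie.1) cost
                  then PySem.Set.add st.2.2 (PySem.List.pyGetD ie.2 3 0) else st.2.2
    (s2, crit, pseudo)

def drvB (n : Int) (order : List (Int × List Int)) (base : Option Int)
    (st : List Int × List Int) (pp : Int × (Int × List Int)) : List Int × List Int :=
  let rest := PySem.List.slice order none (some pp.1) ++ PySem.List.slice order (some (pp.1 + 1)) none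
  let ex := match rest with
    | [] => none
    | r :: _ => kruskalB n rest r
  let crit := if pyGtI ex base then PySem.Set.add st.1 pp.2.1 else st.1
  let pseudo := if pyEqI (kruskalB n order pp.2) base then PySem.Set.add st.2 pp.2.1 else st.2
  (crit, pseudo)

theorem portA_eq (n : Int) (edges : List (List Int)) :
    findCriticalAndPseudoCriticalEdges n edges =
      [cpySetList ((PySem.List.enumerate (PySem.List.sorted ((PySem.List.enumerate edges).map toQuad)
            (fun x => PySem.List.pyGetD x 2 0) false)).foldl
          (drvA n (mstA n (PySem.List.sorted ((PySem.List.enumerate edges).map toQuad)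
            (fun x => PySem.List.pyGetD x 2 0) false) 0))
          ((PySem.List.sorted ((PySem.List.enumerate edges).map toQuad)
            (fun x => PySem.List.pyGetD x 2 0) false), PySem.Set.empty, PySem.Set.empty)).2.1,
       cpyDiffList ((PySem.List.enumerate (PySem.List.sorted ((PySem.List.enumerate edges).map toQuad)
            (fun x => PySem.List.pyGetD x 2 0) false)).foldl
          (drvA n (mstA n (PySem.List.sorted ((PySem.List.enumerate edges).map toQuad)
            (fun x => PySem.List.pyGetD x 2 0) false) 0))
          ((PySem.List.sorted ((PySem.List.enumerate edges).map toQuad)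
            (fun x => PySem.List.pyGetD x 2 0) false), PySem.Set.empty, PySem.Set.empty)).2.2 ((PySem.List.enumerate (PySem.List.sorted ((PySem.List.enumerate edges).map toQuad)
            (fun x => PySem.List.pyGetD x 2 0) false)).foldl
          (drvA n (mstA n (PySem.List.sorted ((PySem.List.enumerate edges).map toQuad)
            (fun x => PySem.List.pyGetD x 2 0) false) 0))
          ((PySem.List.sorted ((PySem.List.enumerate edges).map toQuad)
            (fun x => PySem.List.pyGetD x 2 0) false), PySem.Set.empty, PySem.Set.empty)).2.1] := rfl

theorem portB_eq (n : Int) (edges : List (List Int)) :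
    findCriticalAndPseudoCriticalEdges_alt n edges =
      [cpySetList ((PySem.List.enumerate (PySem.List.sorted (PySem.List.enumerate edges)
            (fun p => PySem.List.pyGetD p.2 2 0) false)).foldl
          (drvB n (PySem.List.sorted (PySem.List.enumerate edges)
            (fun p => PySem.List.pyGetD p.2 2 0) false)
            (match (PySem.List.sorted (PySem.List.enumerate edges)
            (fun p => PySem.List.pyGetD p.2 2 0) false) with
             | [] => none
             | o :: _ => kruskalB n (PySem.List.sorted (PySem.List.enumerate edges)
            (fun p => PySem.List.pyGetD p.2 2 0) false) o)) (PySem.Set.empty, PySem.Set.empty)).1,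
       cpyDiffList ((PySem.List.enumerate (PySem.List.sorted (PySem.List.enumerate edges)
            (fun p => PySem.List.pyGetD p.2 2 0) false)).foldl
          (drvB n (PySem.List.sorted (PySem.List.enumerate edges)
            (fun p => PySem.List.pyGetD p.2 2 0) false)
            (match (PySem.List.sorted (PySem.List.enumerate edges)
            (fun p => PySem.List.pyGetD p.2 2 0) false) with
             | [] => none
             | o :: _ => kruskalB n (PySem.List.sorted (PySem.List.enumerate edges)
            (fun p => PySem.List.pyGetD p.2 2 0) false) o)) (PySem.Set.empty, PySem.Set.empty)).2 ((PySem.List.enumerate (PySem.List.sorted (PySem.List.enumerate edges)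
            (fun p => PySem.List.pyGetD p.2 2 0) false)).foldl
          (drvB n (PySem.List.sorted (PySem.List.enumerate edges)
            (fun p => PySem.List.pyGetD p.2 2 0) false)
            (match (PySem.List.sorted (PySem.List.enumerate edges)
            (fun p => PySem.List.pyGetD p.2 2 0) false) with
             | [] => none
             | o :: _ => kruskalB n (PySem.List.sorted (PySem.List.enumerate edges)
            (fun p => PySem.List.pyGetD p.2 2 0) false) o)) (PySem.Set.empty, PySem.Set.empty)).1] := rfl

theorem slice_eraseIdx (order : List (Int × List Int)) (k : Nat) :
    PySem.List.slice order none (some ((k : Nat) : Int)) ++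
      PySem.List.slice order (some (((k : Nat) : Int) + 1)) none = order.eraseIdx k := by
  rw [PySem.List.slice_to_natCast, show ((k : Nat) : Int) + 1 = (((k+1 : Nat) : Nat) : Int) by push_cast; ring,
      PySem.List.slice_from_natCast, List.eraseIdx_eq_take_drop_succ]

theorem drv_loop {n : Int} (hn : 1 ≤ n) (order : List (Int × List Int))
    (hok : ∀ p ∈ order, EOK n p) (hnd : (order.map (fun p => p.1)).Nodup)
    (base : Option Int) :
    ∀ (suf : List (Int × List Int)) (k : Nat), order.drop k = suf →
    ∀ (crit pseudo : List Int),
      (∀ x ∈ crit, x ∈ (order.map (fun p => p.1)).take k) →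
      (∀ x ∈ pseudo, x ∈ (order.map (fun p => p.1)).take k) →
    ∃ C P,
      ((PySem.List.enumerate suf ((k : Nat) : Int)).foldl
          (fun st pp => drvA n base st (pp.1, toQuad pp.2)) (order.map toQuad, crit, pseudo))
        = (order.map toQuad, C, P) ∧
      ((PySem.List.enumerate suf ((k : Nat) : Int)).foldl (drvB n order base) (crit, pseudo)) = (C, P) := by
  intro suf
  induction suf with
  | nil =>
    intro k _ crit pseudo _ _
    exact ⟨crit, pseudo, rfl, rfl⟩
  | cons p suf ih =>
    intro k hdrop crit pseudo hc hp
    have hklen : k < order.length := by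
      have := congrArg List.length hdrop
      rw [List.length_drop] at this
      simp at this; omega
    have hpk : order[k] = p := by
      rw [drop_head_eq hklen] at hdrop
      exact (List.cons.injEq _ _ _ _ ▸ hdrop).1
    have hsuf : order.drop (k+1) = suf := by
      rw [drop_head_eq hklen] at hdrop
      exact (List.cons.injEq _ _ _ _ ▸ hdrop).2
    have hmaplen : k < (order.map toQuad).length := by rw [List.length_map]; exact hklen
    -- the A step
    have hpop : PySem.List.pop? (order.map toQuad) ((k : Nat) : Int) =
        some ((order.map toQuad)[k], (order.map toQuad).eraseIdx k) :=
      PySem.List.pop?_natCast _ k hmaplen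
    have hgetmap : (order.map toQuad)[k] = toQuad p := by
      rw [List.getElem_map]; rw [hpk]
    have heridx : (order.map toQuad).eraseIdx k = (order.eraseIdx k).map toQuad :=
      List.eraseIdx_map _ _ _
    -- excluded-run values agree
    have hex : mstA n ((order.eraseIdx k).map toQuad) 0 =
        (match order.eraseIdx k with
         | [] => none
         | r :: _ => kruskalB n (order.eraseIdx k) r) := by
      cases herase : order.eraseIdx k with
      | nil => simp [mstA]
      | cons r t =>
        have hokr : ∀ q ∈ r :: t, EOK n q :=
          fun q hq => hok q ((List.eraseIdx_sublist order k).subset (by rw [herase]; exact hq))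
        have := run_eq hn (r :: t) hokr 0 (by simp)
        rw [Nat.cast_zero] at this
        rw [this]
        rfl
    -- included-run values agree
    have hokk : EOK n p := hok p (hpk ▸ List.getElem_mem hklen)
    have hinc : mstA n (order.map toQuad) ((k : Nat) : Int) = kruskalB n order p := by
      have := run_eq hn order hok k hklen
      rw [this, hpk]
    have hins : PySem.List.insert ((order.map toQuad).eraseIdx k) ((k : Nat) : Int)
        (order.map toQuad)[k] = order.map toQuad := insert_eraseIdx _ k hmaplen
    -- freshness of this index
    have hdk : p.1 = (order.map (fun p => p.1))[k]'(by rw [List.length_map]; exact hklen) := by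
      rw [List.getElem_map, hpk]
    have hdfresh : p.1 ∉ (order.map (fun p => p.1)).take k := by
      rw [hdk]; exact getElem_not_mem_take hnd _
    have hcfresh : p.1 ∉ crit := fun hx => hdfresh (hc _ hx)
    have hpfresh : p.1 ∉ pseudo := fun hx => hdfresh (hp _ hx)
    -- one A step equals one B step
    have hstepA : drvA n base (order.map toQuad, crit, pseudo) (((k : Nat) : Int), toQuad p) =
        (order.map toQuad,
         (if pyGtI (mstA n ((order.eraseIdx k).map toQuad) 0) base then crit ++ [p.1] else crit),
         (if pyEqI (kruskalB n order p) base then pseudo ++ [p.1] else pseudo)) := by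
      have hins2 : PySem.List.insert ((order.eraseIdx k).map toQuad) ((k : Nat) : Int) (toQuad p) =
          order.map toQuad := by rw [← heridx, ← hgetmap]; exact hins
      unfold drvA
      rw [hpop]
      simp only [quad_get3, heridx, hgetmap]
      rw [hins2, hinc]
      refine congrArg₂ Prod.mk rfl (congrArg₂ Prod.mk ?_ ?_)
      · by_cases hg : pyGtI (mstA n ((order.eraseIdx k).map toQuad) 0) base
        · rw [if_pos hg, if_pos hg]
          exact PySem.Set.add_of_not_mem hcfresh
        · rw [if_neg hg, if_neg hg]
      · by_cases hg : pyEqI (kruskalB n order p) base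
        · rw [if_pos hg, if_pos hg]
          exact PySem.Set.add_of_not_mem hpfresh
        · rw [if_neg hg, if_neg hg]
    have hstepB : drvB n order base (crit, pseudo) (((k : Nat) : Int), p) =
        ((if pyGtI (mstA n ((order.eraseIdx k).map toQuad) 0) base then crit ++ [p.1] else crit),
         (if pyEqI (kruskalB n order p) base then pseudo ++ [p.1] else pseudo)) := by
      unfold drvB
      rw [slice_eraseIdx, hex]
      refine congrArg₂ Prod.mk ?_ ?_
      · by_cases hg : pyGtI (match order.eraseIdx k with
            | [] => (none : Option Int)
            | r :: _ => kruskalB n (order.eraseIdx k) r) base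
        · rw [if_pos hg, if_pos hg]
          exact PySem.Set.add_of_not_mem hcfresh
        · rw [if_neg hg, if_neg hg]
      · by_cases hg : pyEqI (kruskalB n order p) base
        · rw [if_pos hg, if_pos hg]
          exact PySem.Set.add_of_not_mem hpfresh
        · rw [if_neg hg, if_neg hg]
    set crit' := (if pyGtI (mstA n ((order.eraseIdx k).map toQuad) 0) base then crit ++ [p.1] else crit) with hcrit'
    set pseudo' := (if pyEqI (kruskalB n order p) base then pseudo ++ [p.1] else pseudo) with hpseudo'
    have htake1 : (order.map (fun p => p.1)).take k ⊆ (order.map (fun p => p.1)).take (k+1) := by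
      rw [List.take_add_one]
      exact fun x hx => List.mem_append_left _ hx
    have hmem1 : p.1 ∈ (order.map (fun p => p.1)).take (k+1) := by
      rw [List.take_add_one, hdk]
      apply List.mem_append_right
      rw [List.getElem?_eq_getElem (by rw [List.length_map]; exact hklen)]
      exact List.mem_singleton.2 rfl
    have hc' : ∀ x ∈ crit', x ∈ (order.map (fun p => p.1)).take (k+1) := by
      intro x hx
      rw [hcrit'] at hx
      by_cases hg : pyGtI (mstA n ((order.eraseIdx k).map toQuad) 0) base
      · rw [if_pos hg] at hx
        rcases List.mem_append.1 hx with h1 | h1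
        · exact htake1 (hc x h1)
        · rw [List.mem_singleton.1 h1]; exact hmem1
      · rw [if_neg hg] at hx
        exact htake1 (hc x hx)
    have hp' : ∀ x ∈ pseudo', x ∈ (order.map (fun p => p.1)).take (k+1) := by
      intro x hx
      rw [hpseudo'] at hx
      by_cases hg : pyEqI (kruskalB n order p) base
      · rw [if_pos hg] at hx
        rcases List.mem_append.1 hx with h1 | h1
        · exact htake1 (hp x h1)
        · rw [List.mem_singleton.1 h1]; exact hmem1
      · rw [if_neg hg] at hx
        exact htake1 (hp x hx)
    obtain ⟨C, P, hA, hB⟩ := ih (k+1) hsuf crit' pseudo' hc' hp'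
    refine ⟨C, P, ?_, ?_⟩
    · rw [PySem.List.enumerate_cons, List.foldl_cons]
      simp only
      rw [hstepA]
      rw [show ((k : Nat) : Int) + 1 = (((k+1 : Nat)) : Int) by push_cast; ring]
      exact hA
    · rw [PySem.List.enumerate_cons, List.foldl_cons]
      rw [hstepB]
      rw [show ((k : Nat) : Int) + 1 = (((k+1 : Nat)) : Int) by push_cast; ring]
      exact hB
theorem enumerate_nil_iff {α : Type} (l : List α) : PySem.List.enumerate l 0 = [] ↔ l = [] := by
  cases l with
  | nil => simp
  | cons x xs =>
    rw [PySem.List.enumerate_cons]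
    constructor <;> intro h <;> cases h

theorem pv_main' : ∀ (n : Int) (edges : List (List Int)),
    Pre_findCriticalAndPseudoCriticalEdges n edges →
    findCriticalAndPseudoCriticalEdges n edges = findCriticalAndPseudoCriticalEdges_alt n edges := by
  intro n edges hpre
  by_cases hemp : edges = []
  · subst hemp
    rfl
  · have hPre2 := hpre.resolve_left hemp
    obtain ⟨hn, hedges⟩ := hPre2
    rw [portA_eq, portB_eq]
    have hsed : PySem.List.sorted ((PySem.List.enumerate edges).map toQuad)
        (fun x => PySem.List.pyGetD x 2 0) false =
        (PySem.List.sorted (PySem.List.enumerate edges)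
          (fun p => PySem.List.pyGetD p.2 2 0) false).map toQuad :=
      sorted_map_comm toQuad _ _ quad_get2 _
    set order := PySem.List.sorted (PySem.List.enumerate edges)
        (fun p => PySem.List.pyGetD p.2 2 0) false with horder
    have hok : ∀ p ∈ order, EOK n p := by
      intro p hp
      have hmem : p ∈ PySem.List.enumerate edges :=
        (PySem.List.mem_sorted _ _ _ _).1 hp
      obtain ⟨k, hk, hpe⟩ := (PySem.List.mem_enumerate_iff _ _ _).1 hmem
      have hpe2 : p.2 = edges[k] := by rw [hpe]
      have hedge := hedges edges[k] (List.getElem_mem hk)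
      obtain ⟨hlen3, h00, h01, h10, h11⟩ := hedge
      constructor
      · rw [hpe2, PySem.List.pyGetD_zero]
        exact ⟨h00, h01⟩
      · rw [hpe2, PySem.List.pyGetD_ofNat' edges[k] 1 0]
        exact ⟨h10, h11⟩
    have hnd : (order.map (fun p => p.1)).Nodup := by
      have hperm : order.Perm (PySem.List.enumerate edges) :=
        PySem.List.sorted_perm _ _ _
      rw [(hperm.map (fun p => p.1)).nodup_iff]
      rw [PySem.List.map_fst_enumerate]
      exact PySem.List.nodup_pyRange_one _ _
    have hordne : order ≠ [] := by
      intro hcon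
      rw [horder, PySem.List.sorted_eq_nil_iff, enumerate_nil_iff] at hcon
      exact hemp hcon
    obtain ⟨o, rest, horder2⟩ : ∃ o rest, order = o :: rest := by
      cases ho : order with
      | nil => exact absurd ho hordne
      | cons o rest => exact ⟨o, rest, rfl⟩
    have h0len : 0 < order.length := by rw [horder2]; simp
    have hcost : mstA n (order.map toQuad) 0 = kruskalB n order o := by
      have hre := run_eq hn order hok 0 h0len
      rw [Nat.cast_zero] at hre
      rw [hre]
      have h00 : order[0]'h0len = o := by
        simp only [horder2, List.getElem_cons_zero]
      rw [h00]
    have hbase : (match order with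
        | [] => (none : Option Int)
        | o' :: _ => kruskalB n order o') = kruskalB n order o := by
      rw [horder2]
    obtain ⟨C, P, hA, hB⟩ := drv_loop hn order hok hnd (kruskalB n order o) order 0
      List.drop_zero [] []
      (fun x hx => absurd hx (List.not_mem_nil)) (fun x hx => absurd hx (List.not_mem_nil))
    rw [Nat.cast_zero] at hA hB
    rw [hsed, hcost, hbase]
    simp only [PySem.Set.empty]
    rw [enumerate_map, List.foldl_map, hA, hB]

-- ===== VERDICT (by name: the statement is the Claim_ definition above) =====
theorem findCriticalAndPseudoCriticalEdges_spec : Claim_equal_findCriticalAndPseudoCriticalEdges := by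
  intro n edges _ hpre
  exact pv_main' n edges hpre
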